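-- pv_equiv track=rewrite | github.com/Ethara-Ai/kaiju | commit0/harness/patch_utils_java.py | filter_patch_java_only
-- ===== SOURCE A (Python) =====
-- def filter_patch_java_only(patch_content: str) -> str:
--     lines = patch_content.split("\n")
--     filtered = []
--     include_hunk = False
--
--     for line in lines:
--         if line.startswith("diff --git"):
--             include_hunk = line.endswith(".java") or ".java " in line
--         if include_hunk:
--             filtered.append(line)
--
--     return "\n".join(filtered)
-- ===== SOURCE B (Python) =====
-- def filter_patch_java_only(patch_content: str) -> str:
--     lines = patch_content.split("\n")
--     # Pass 1: group the lines into blocks, one per "diff --git" header;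
--     # lines before the first header belong to no block and are dropped.
--     blocks = []
--     for line in lines:
--         if line.startswith("diff --git"):
--             blocks.append([line])
--         elif blocks:
--             blocks[-1].append(line)
--     # Pass 2: keep exactly the blocks whose header mentions a .java file.
--     out = []
--     for b in blocks:
--         h = b[0]
--         if h.endswith(".java") or ".java " in h:
--             out.extend(b)
--     return "\n".join(out)
-- ===== Notes on version B (the rewrite author's own statement) =====
-- stated objective: alternative
-- what changed: B replaces A's streaming include-flag with a two-pass decomposition: first group lines into per-header blocks, then keep whole blocks whose header mentions .java.
import Mathlib
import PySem

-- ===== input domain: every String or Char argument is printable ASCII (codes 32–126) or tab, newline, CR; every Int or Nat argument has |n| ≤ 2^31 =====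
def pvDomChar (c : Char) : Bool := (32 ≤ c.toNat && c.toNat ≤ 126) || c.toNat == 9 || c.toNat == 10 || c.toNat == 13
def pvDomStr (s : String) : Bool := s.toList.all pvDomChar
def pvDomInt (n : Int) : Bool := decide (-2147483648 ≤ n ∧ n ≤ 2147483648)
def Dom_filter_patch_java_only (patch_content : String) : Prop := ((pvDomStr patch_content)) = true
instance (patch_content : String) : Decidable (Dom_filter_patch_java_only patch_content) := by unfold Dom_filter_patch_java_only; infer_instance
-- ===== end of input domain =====

-- B: two-pass decomposition (group lines into per-header blocks, then filter whole blocks) instead of A's streaming boolean flag; same return value, same cost.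

-- ===== PORT A =====
-- one iteration of A's loop over lines, state = (filtered, include_hunk)
def aStep (st : List String × Bool) (line : String) : List String × Bool :=
  let include_hunk :=
    if PySem.Str.startswith line "diff --git" then
      PySem.Str.endswith line ".java" || PySem.Str.isIn ".java " line
    else st.2
  (if include_hunk then st.1 ++ [line] else st.1, include_hunk)

def filter_patch_java_only (patch_content : String) : String :=
  -- s.split("\n"): split? is none only for an empty separator, so getD is exact here
  let lines := (PySem.Str.split? patch_content "\n").getD []
  let st := lines.foldl aStep ([], false)
  PySem.Str.join "\n" st.1

-- ===== PORT B =====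
-- one step of B's first loop: a header opens a new block, other lines extend the last block (if any)
def altGroupStep (bs : List (List String)) (line : String) : List (List String) :=
  if PySem.Str.startswith line "diff --git" then bs ++ [[line]]
  else
    match bs.getLast? with        -- 'elif blocks: blocks[-1].append(line)'
    | some lb => bs.dropLast ++ [lb ++ [line]]
    | none => bs

-- header test of B's second loop; b[0] ported as headD "" (every block built by altGroupStep is nonempty)
def altKeepBlock (b : List String) : Bool :=
  PySem.Str.endswith (b.headD "") ".java" || PySem.Str.isIn ".java " (b.headD "")

def filter_patch_java_only_alt (patch_content : String) : String :=
  -- s.split("\n"): split? is none only for an empty separator, so getD is exact here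
  let lines := (PySem.Str.split? patch_content "\n").getD []
  let blocks := lines.foldl altGroupStep []
  let out := blocks.foldl (fun out b => if altKeepBlock b then out ++ b else out) []
  PySem.Str.join "\n" out

-- ===== PRECONDITION & SPEC =====
def Spec_filter_patch_java_only (patch_content : String) (out : String) : Prop := out = filter_patch_java_only_alt patch_content
instance (patch_content : String) (out : String) : Decidable (Spec_filter_patch_java_only patch_content out) := by unfold Spec_filter_patch_java_only; infer_instance

-- ===== CLAIM (what is proved, stated in full; the proofs are below) =====
def Claim_equal_filter_patch_java_only : Prop := ∀ (patch_content : String), Dom_filter_patch_java_only patch_content → Spec_filter_patch_java_only patch_content (filter_patch_java_only patch_content)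

-- ===== LEMMAS AND PROOFS =====

-- B's second loop is filter-then-flatten
theorem foldl_keep_eq (bs : List (List String)) (out : List String) :
    bs.foldl (fun out b => if altKeepBlock b then out ++ b else out) out
      = out ++ (bs.filter altKeepBlock).flatten := by
  induction bs generalizing out with
  | nil => simp
  | cons b bs ih =>
    simp only [List.foldl_cons, List.filter_cons]
    by_cases h : altKeepBlock b = true
    · simp [h, ih]
    · simp only [h, Bool.false_eq_true, if_false, ih]

-- the A-state determined by B's block list
def accOf (bs : List (List String)) : List String := (bs.filter altKeepBlock).flatten
def flagOf (bs : List (List String)) : Bool :=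
  match bs.getLast? with | some lb => altKeepBlock lb | none => false

theorem aStep_of_blocks (bs : List (List String)) (line : String)
    (hne : ∀ b ∈ bs, b ≠ []) :
    aStep (accOf bs, flagOf bs) line = (accOf (altGroupStep bs line), flagOf (altGroupStep bs line)) := by
  by_cases hP : PySem.Str.startswith line "diff --git" = true
  · have hstep : altGroupStep bs line = bs ++ [[line]] := by
      unfold altGroupStep; rw [if_pos hP]
    have hq : altKeepBlock [line]
        = (PySem.Str.endswith line ".java" || PySem.Str.isIn ".java " line) := by
      simp only [altKeepBlock, List.headD_cons]
    unfold aStep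
    rw [hstep]
    simp only [if_pos hP]
    rw [← hq]
    cases h' : altKeepBlock [line] <;>
      simp [accOf, flagOf, List.filter_append, h']
  · unfold aStep
    simp only [if_neg hP]
    cases hlast : bs.getLast? with
    | none =>
      have hbs : bs = [] := List.getLast?_eq_none_iff.mp hlast
      subst hbs
      have hstep : altGroupStep [] line = [] := by
        unfold altGroupStep; rw [if_neg hP]; rfl
      rw [hstep]
      simp [accOf, flagOf]
    | some lb =>
      obtain ⟨ys, rfl⟩ : ∃ ys, bs = ys ++ [lb] := by
        rcases List.eq_nil_or_concat bs with rfl | ⟨ys, z, rfl⟩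
        · simp at hlast
        · simp at hlast; exact ⟨ys, by simp [hlast]⟩
      have hlbne : lb ≠ [] := hne lb (by simp)
      have hstep : altGroupStep (ys ++ [lb]) line = ys ++ [lb ++ [line]] := by
        unfold altGroupStep; rw [if_neg hP]; simp
      have hq : altKeepBlock (lb ++ [line]) = altKeepBlock lb := by
        cases lb with
        | nil => exact absurd rfl hlbne
        | cons a l => simp [altKeepBlock]
      rw [hstep]
      have hflag : flagOf (ys ++ [lb]) = altKeepBlock lb := by
        simp [flagOf]
      by_cases hQ : altKeepBlock lb = true <;>
        simp [accOf, flagOf, List.filter_append, hq, hQ]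

-- every block altGroupStep builds is nonempty
theorem altGroupStep_nonempty (bs : List (List String)) (line : String)
    (hne : ∀ b ∈ bs, b ≠ []) : ∀ b ∈ altGroupStep bs line, b ≠ [] := by
  intro b hb
  unfold altGroupStep at hb
  by_cases hP : PySem.Str.startswith line "diff --git" = true
  · rw [if_pos hP] at hb
    rcases List.mem_append.mp hb with h | h
    · exact hne b h
    · simp at h; simp [h]
  · rw [if_neg hP] at hb
    cases hlast : bs.getLast? with
    | none => rw [hlast] at hb; exact hne b hb
    | some lb =>
      rw [hlast] at hb
      rcases List.mem_append.mp hb with h | h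
      · exact hne b (List.dropLast_subset _ h)
      · simp at h; simp [h]

-- the loop invariant: A's fold from the state of bs equals B's grouped fold
theorem main_inv (lines : List String) (bs : List (List String))
    (hne : ∀ b ∈ bs, b ≠ []) :
    lines.foldl aStep (accOf bs, flagOf bs)
      = (accOf (lines.foldl altGroupStep bs), flagOf (lines.foldl altGroupStep bs)) := by
  induction lines generalizing bs with
  | nil => simp
  | cons line rest ih =>
    simp only [List.foldl_cons]
    rw [aStep_of_blocks bs line hne]
    exact ih (altGroupStep bs line) (altGroupStep_nonempty bs line hne)

-- ===== VERDICT (by name: the statement is the Claim_ definition above) =====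
theorem filter_patch_java_only_spec : Claim_equal_filter_patch_java_only := by
  intro patch_content _
  unfold Spec_filter_patch_java_only
  show PySem.Str.join "\n" (List.foldl aStep ([], false) ((PySem.Str.split? patch_content "\n").getD [])).1
      = PySem.Str.join "\n" (List.foldl (fun out b => if altKeepBlock b then out ++ b else out) []
          (List.foldl altGroupStep [] ((PySem.Str.split? patch_content "\n").getD [])))
  have h := main_inv ((PySem.Str.split? patch_content "\n").getD []) [] (by simp)
  have h0 : (accOf [], flagOf []) = (([] : List String), false) := by simp [accOf, flagOf]
  rw [h0] at h
  rw [foldl_keep_eq, List.nil_append, h]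
  rfl
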